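-- pv_equiv track=rewrite | github.com/MichalHe/amaya | amaya/visualization.py | compute_html_label_for_symbols
-- ===== SOURCE A (Python) =====
-- from typing import (
--     Any,
--     Callable,
--     Dict,
--     Generator,
--     Iterable,
--     List,
--     Optional,
--     Set,
--     Tuple,
--     Union,
-- )
--
-- def compute_html_label_for_symbols(variable_names: List[str], symbols: List[Tuple[int, ...]]):
--     label = '<<TABLE BORDER="0" SIDES="LR" CELLPADDING="1" CELLSPACING="0">'
--
--     table_row_count = len(symbols[0])
--     table_column_count = len(symbols)
--
--     for row in range(table_row_count):
--         label += '<TR>'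
--         is_first_column = True
--         label += f'<TD BORDER="0" BGCOLOR="gray">{variable_names[row]}:</TD>'
--         for column in range(table_column_count):
--             if not is_first_column:
--                 sides = "L"
--                 border = "1"
--             else:
--                 sides = ""
--                 border = "0"
--
--             label += f'<TD BORDER="{border}" sides="{sides}">'
--             label += f'{symbols[column][row]}'
--             label += '</TD>'
--
--             is_first_column = False
--         label += '</TR>'
--
--     label += '</TABLE>>'
--     return label
-- ===== SOURCE B (Python) =====
-- def compute_html_label_for_symbols(variable_names, symbols):
--     # Column-major construction: keep one growing buffer per table row and
--     # append each column's cell to every row buffer in turn.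
--     n_rows = len(symbols[0])
--     rows = ['<TR><TD BORDER="0" BGCOLOR="gray">%s:</TD>' % variable_names[r]
--             for r in range(n_rows)]
--     for c, col in enumerate(symbols):
--         border, sides = ('1', 'L') if c else ('0', '')
--         for r in range(n_rows):
--             rows[r] += '<TD BORDER="%s" sides="%s">%s</TD>' % (border, sides, col[r])
--     body = ''.join(row + '</TR>' for row in rows)
--     return ('<<TABLE BORDER="0" SIDES="LR" CELLPADDING="1" CELLSPACING="0">'
--             + body + '</TABLE>>')
-- ===== Notes on version B (the rewrite author's own statement) =====
-- stated objective: alternative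
-- what changed: B builds the table column-major: it keeps one growing string buffer per table row and, iterating over the symbol columns in their given order, appends each column's cell to every row buffer, finally joining the closed rows; A builds the label row-major with nested index loops and a single string accumulator. Pre_ excludes the inputs on which A raises IndexError (empty symbols, variable_names or a column shorter than len(symbols[0])).
import Mathlib
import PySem

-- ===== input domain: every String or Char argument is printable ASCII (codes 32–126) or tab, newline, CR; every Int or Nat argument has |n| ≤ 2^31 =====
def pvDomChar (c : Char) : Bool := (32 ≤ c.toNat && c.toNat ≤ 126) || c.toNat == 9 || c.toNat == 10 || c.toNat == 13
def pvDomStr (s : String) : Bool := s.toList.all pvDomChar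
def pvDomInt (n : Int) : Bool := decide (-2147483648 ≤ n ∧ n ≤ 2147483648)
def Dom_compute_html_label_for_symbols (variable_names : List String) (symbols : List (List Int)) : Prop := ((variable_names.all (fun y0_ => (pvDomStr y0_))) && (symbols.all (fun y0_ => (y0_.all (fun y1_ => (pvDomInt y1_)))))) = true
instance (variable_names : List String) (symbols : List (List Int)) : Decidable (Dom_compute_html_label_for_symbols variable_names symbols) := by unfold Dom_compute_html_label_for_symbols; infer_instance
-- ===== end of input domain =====

-- B builds the label column-major: one growing buffer per table row, each column's cell
-- appended to every row buffer in turn (A is row-major with nested index loops); objective: alternative.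


-- ===== PORT A =====
-- `xs[i]` with 0 ≤ i is ported as `xs.getD i d`; Python raises IndexError when i ≥ len(xs),
-- and Pre_ excludes exactly those inputs, so the default is never reached on the claimed domain.
-- the inner column loop body of A (state: the label so far and is_first_column)
def pvStepA (symbols : List (List Int)) (row : Nat) (st : String × Bool) (column : Nat) : String × Bool :=
  let sides := if st.2 then "" else "L"
  let border := if st.2 then "0" else "1"
  let l := st.1 ++ "<TD BORDER=\"" ++ border ++ "\" sides=\"" ++ sides ++ "\">"
  let l := l ++ PySem.Int.toStr ((symbols.getD column []).getD row 0)
  (l ++ "</TD>", false)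

-- the outer row loop body of A
def pvRowStepA (variable_names : List String) (symbols : List (List Int))
    (label : String) (row : Nat) : String :=
  let label := label ++ "<TR>"
  let label := label ++ "<TD BORDER=\"0\" BGCOLOR=\"gray\">" ++ variable_names.getD row "" ++ ":</TD>"
  ((List.range symbols.length).foldl (pvStepA symbols row) (label, true)).1 ++ "</TR>"

def compute_html_label_for_symbols (variable_names : List String) (symbols : List (List Int)) : String :=
  let label := "<<TABLE BORDER=\"0\" SIDES=\"LR\" CELLPADDING=\"1\" CELLSPACING=\"0\">"
  let table_row_count := (symbols.headD []).length   -- len(symbols[0]); Pre_ requires symbols ≠ []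
  let label := (List.range table_row_count).foldl (pvRowStepA variable_names symbols) label
  label ++ "</TABLE>>"

-- ===== PORT B =====
-- the initial per-row buffer: the row's header cell
def pvHeaderB (variable_names : List String) (r : Nat) : String :=
  "<TR><TD BORDER=\"0\" BGCOLOR=\"gray\">" ++ variable_names.getD r "" ++ ":</TD>"

-- one column step: append this column's cell to every row buffer (rows[r] += cell(col[r]))
def pvColStepB (rows : List String) (p : List Int × Nat) : List String :=
  let border := if p.2 == 0 then "0" else "1"
  let sides := if p.2 == 0 then "" else "L"
  rows.zipIdx.map (fun q =>
    q.1 ++ "<TD BORDER=\"" ++ border ++ "\" sides=\"" ++ sides ++ "\">" ++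
      PySem.Int.toStr (p.1.getD q.2 0) ++ "</TD>")

def compute_html_label_for_symbols_alt (variable_names : List String) (symbols : List (List Int)) : String :=
  let n_rows := (symbols.headD []).length   -- len(symbols[0]); Pre_ requires symbols ≠ []
  let rows := symbols.zipIdx.foldl pvColStepB ((List.range n_rows).map (pvHeaderB variable_names))
  "<<TABLE BORDER=\"0\" SIDES=\"LR\" CELLPADDING=\"1\" CELLSPACING=\"0\">" ++
    PySem.Str.join "" (rows.map (fun row => row ++ "</TR>")) ++ "</TABLE>>"

-- ===== PRECONDITION & SPEC =====
-- Exactly the inputs on which the Python A returns: symbols nonempty, variable_names covers the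
-- n = len(symbols[0]) table rows, and every column has at least n entries (else A raises IndexError).
def Pre_compute_html_label_for_symbols (variable_names : List String) (symbols : List (List Int)) : Prop :=
  symbols ≠ [] ∧ (symbols.headD []).length ≤ variable_names.length ∧
    ∀ c ∈ symbols, (symbols.headD []).length ≤ c.length
instance (variable_names : List String) (symbols : List (List Int)) : Decidable (Pre_compute_html_label_for_symbols variable_names symbols) := by unfold Pre_compute_html_label_for_symbols; infer_instance

def pvWitness_compute_html_label_for_symbols : List String × List (List Int) := (["x", "y"], [[1, 2], [3, 4], [5, 6]])

def Spec_compute_html_label_for_symbols (variable_names : List String) (symbols : List (List Int)) (out : String) : Prop := out = compute_html_label_for_symbols_alt variable_names symbols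
instance (variable_names : List String) (symbols : List (List Int)) (out : String) : Decidable (Spec_compute_html_label_for_symbols variable_names symbols out) := by unfold Spec_compute_html_label_for_symbols; infer_instance

-- ===== CLAIM (what is proved, stated in full; the proofs are below) =====
def Claim_equal_compute_html_label_for_symbols : Prop := ∀ (variable_names : List String) (symbols : List (List Int)), Dom_compute_html_label_for_symbols variable_names symbols → Pre_compute_html_label_for_symbols variable_names symbols → Spec_compute_html_label_for_symbols variable_names symbols (compute_html_label_for_symbols variable_names symbols)

-- ===== LEMMAS AND PROOFS =====

-- the cell string, phrased on the flag A carries (true on the first column)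
def pvCellA (first : Bool) (v : Int) : String :=
  "<TD BORDER=\"" ++ (if first then "0" else "1") ++ "\" sides=\"" ++
    (if first then "" else "L") ++ "\">" ++ PySem.Int.toStr v ++ "</TD>"

-- the common normal form of one row's cells: first cell flagged, the rest not
def pvCells : List Int → String
  | [] => ""
  | v :: vs => pvCellA true v ++ PySem.Str.join "" (vs.map (pvCellA false))

theorem intercalate_nil_flatten (l : List (List Char)) :
    ([] : List Char).intercalate l = l.flatten := by
  simp [List.intercalate]
  induction l with
  | nil => rfl
  | cons a as ih => cases as <;> simp_all [List.intersperse]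

theorem str_join_cons (a : String) (l : List String) :
    PySem.Str.join "" (a :: l) = a ++ PySem.Str.join "" l := by
  simp only [PySem.Str.join, PySem.Chars.join, List.map_cons, String.toList_empty,
    intercalate_nil_flatten, List.flatten_cons, String.ofList_append, String.ofList_toList]

theorem str_join_nil : PySem.Str.join "" [] = "" := rfl

-- ---- A's side: the label is the prefix, the joined rows, and the suffix ----

-- A's inner column loop, once the flag has dropped
theorem stepA_false (symbols : List (List Int)) (row : Nat) (l : List Nat) (s : String) :
    List.foldl (pvStepA symbols row) (s, false) l
      = (s ++ PySem.Str.join ""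
          ((l.map (fun j => (symbols.getD j []).getD row 0)).map (pvCellA false)), false) := by
  induction l generalizing s with
  | nil => simp [str_join_nil]
  | cons j js ih =>
    simp only [List.foldl_cons, pvStepA, ih, List.map_cons, str_join_cons]
    simp [pvCellA, String.append_assoc]

-- A's inner column loop from the initial (s, true) state
theorem stepA (symbols : List (List Int)) (row : Nat) (l : List Nat) (s : String) :
    (List.foldl (pvStepA symbols row) (s, true) l).1
      = s ++ pvCells (l.map (fun j => (symbols.getD j []).getD row 0)) := by
  cases l with
  | nil => simp [pvCells]
  | cons j js =>
    simp only [List.foldl_cons, pvStepA, stepA_false, pvCells, List.map_cons]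
    simp [pvCellA, String.append_assoc]

theorem map_getD_range {α : Type} (xs : List α) (d : α) :
    (List.range xs.length).map (fun j => xs.getD j d) = xs := by
  apply List.ext_getElem
  · simp
  · intro i h1 h2
    simp only [List.getElem_map, List.getElem_range, List.getD_eq_getElem?_getD]
    simp at h1
    rw [List.getElem?_eq_getElem h1]
    rfl

-- values A reads in row i are the i-th transposed row
theorem vals_eq (symbols : List (List Int)) (i : Nat) :
    (List.range symbols.length).map (fun j => (symbols.getD j []).getD i 0)
      = symbols.map (fun c => c.getD i 0) := by
  conv_rhs => rw [← map_getD_range symbols []]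
  rw [List.map_map]
  rfl

-- a foldl that only appends row fragments is their join
theorem foldl_rows {body : String → Nat → String} {h : Nat → String}
    (hb : ∀ s i, body s i = s ++ h i) (l : List Nat) (s : String) :
    List.foldl body s l = s ++ PySem.Str.join "" (l.map h) := by
  induction l generalizing s with
  | nil => simp [str_join_nil]
  | cons i is ih => simp only [List.foldl_cons, hb, ih, List.map_cons, str_join_cons,
      String.append_assoc]

-- one full table row, in A's shape
def pvRowA (variable_names : List String) (symbols : List (List Int)) (i : Nat) : String :=
  "<TR>" ++ "<TD BORDER=\"0\" BGCOLOR=\"gray\">" ++ variable_names.getD i "" ++ ":</TD>" ++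
    pvCells (symbols.map (fun c => c.getD i 0)) ++ "</TR>"

theorem rowA_eq (variable_names : List String) (symbols : List (List Int))
    (s : String) (i : Nat) :
    pvRowStepA variable_names symbols s i = s ++ pvRowA variable_names symbols i := by
  simp only [pvRowStepA, stepA, vals_eq, pvRowA, String.append_assoc]

-- ---- B's side: the column fold keeps rows in the shape (range' 0 n).map f ----

-- enumerate over a mapped arithmetic range pairs each buffer with its row index
theorem zipIdx_range' {α : Type} (f : Nat → α) (n k : Nat) :
    ((List.range' k n).map f).zipIdx k = (List.range' k n).map (fun r => (f r, r)) := by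
  induction n generalizing k with
  | zero => rfl
  | succ n ih => simp [List.range'_succ, List.zipIdx_cons, ih]

-- one column step on rows of that shape appends this column's cell to each buffer
theorem colStepB_map (f : Nat → String) (col : List Int) (c : Nat) (n : Nat) :
    pvColStepB ((List.range' 0 n).map f) (col, c)
      = (List.range' 0 n).map (fun r => f r ++ pvCellA (c == 0) (col.getD r 0)) := by
  simp only [pvColStepB, zipIdx_range', List.map_map]
  apply List.map_congr_left
  intro r _
  cases h : (c == 0) <;> simp [pvCellA, String.append_assoc]

-- the fold over the remaining columns (indices ≥ 1): every cell is a non-first cell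
theorem foldB_tail (cols : List (List Int)) (n k : Nat) (f : Nat → String) :
    List.foldl pvColStepB ((List.range' 0 n).map f) (cols.zipIdx (k + 1))
      = (List.range' 0 n).map (fun r =>
          f r ++ PySem.Str.join "" (cols.map (fun col => pvCellA false (col.getD r 0)))) := by
  induction cols generalizing k f with
  | nil => simp [str_join_nil]
  | cons col cs ih =>
    simp only [List.zipIdx_cons, List.foldl_cons, colStepB_map]
    rw [ih (k + 1)]
    apply List.map_congr_left
    intro r _
    simp [List.map_cons, str_join_cons, String.append_assoc]

-- the whole column fold: each row buffer ends as header ++ that row's cells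
theorem foldB (col : List Int) (cs : List (List Int)) (n : Nat)
    (variable_names : List String) :
    List.foldl pvColStepB ((List.range' 0 n).map (pvHeaderB variable_names))
        ((col :: cs).zipIdx 0)
      = (List.range' 0 n).map (fun r =>
          pvHeaderB variable_names r ++ pvCells ((col :: cs).map (fun c => c.getD r 0))) := by
  simp only [List.zipIdx_cons, List.foldl_cons, colStepB_map, Nat.zero_add]
  rw [foldB_tail cs n 0]
  apply List.map_congr_left
  intro r _
  simp [pvCells, String.append_assoc, Function.comp_def]

-- ===== VERDICT (by name: the statement is the Claim_ definition above) =====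
theorem compute_html_label_for_symbols_spec : Claim_equal_compute_html_label_for_symbols := by
  intro variable_names symbols _ hpre
  obtain ⟨hne, hvn, hlen⟩ := hpre
  unfold Spec_compute_html_label_for_symbols
  cases symbols with
  | nil => exact absurd rfl hne
  | cons col cs =>
    simp only [compute_html_label_for_symbols, compute_html_label_for_symbols_alt]
    rw [foldl_rows (rowA_eq variable_names (col :: cs))]
    rw [List.range_eq_range', foldB, List.map_map]
    congr 2
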